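-- pv_equiv track=rewrite | github.com/jetxeberria/udacity | udacity/lesson_2.py | find_anagrams_udacity_solution
-- ===== SOURCE A (Python) =====
-- def find_anagrams_udacity_solution(letters, words):
--     # Create a dictionary mapping the canonical representation of a word to all anagrams of those letters.
--     lookup = {}
--     for word in words:
--         key = ''.join(sorted(word))
--         if key not in lookup:
--             lookup[key] = set()
--         lookup[key].add(word)
--
--     # Search the lookup table for the queried letters.
--     search = ''.join((sorted(letters)))
--     return lookup.get(search, set())
-- ===== SOURCE B (Python) =====
-- def find_anagrams_udacity_solution(letters, words):
--     # Direct filter: no lookup dictionary; sort the query once, compare each word's sorted form.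
--     target = ''.join(sorted(letters))
--     return {word for word in words if ''.join(sorted(word)) == target}
-- ===== Notes on version B (the rewrite author's own statement) =====
-- stated objective: simpler
-- what changed: Replaced the grouping dictionary (build a canonical-key -> set-of-anagrams index over all words, then look the query up) with a single direct filter: sort the query once and collect into a set every word whose sorted form equals it.
import Mathlib
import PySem

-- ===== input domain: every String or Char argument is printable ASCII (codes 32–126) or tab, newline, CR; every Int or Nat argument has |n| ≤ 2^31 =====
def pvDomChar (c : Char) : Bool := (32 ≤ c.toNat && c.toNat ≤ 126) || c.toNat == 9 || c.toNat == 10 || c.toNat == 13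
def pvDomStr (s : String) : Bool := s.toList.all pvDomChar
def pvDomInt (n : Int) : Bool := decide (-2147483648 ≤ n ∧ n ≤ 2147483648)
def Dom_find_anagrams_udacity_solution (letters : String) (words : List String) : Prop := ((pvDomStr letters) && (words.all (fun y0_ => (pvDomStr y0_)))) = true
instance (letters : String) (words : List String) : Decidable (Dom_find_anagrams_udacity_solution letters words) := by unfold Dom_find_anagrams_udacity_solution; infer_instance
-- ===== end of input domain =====

-- B replaces A's canonical-key grouping dictionary with a direct filter over the words (objective: simpler).
-- The Python functions return a set; the ports return its elements as a PySem.Set list (first-occurrence order).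

-- ''.join(sorted(s)) — shared by both Pythons
def pvSortKey (s : String) : String := String.ofList (PySem.List.sorted s.toList (fun c => c) false)

-- ===== PORT A =====
def find_anagrams_udacity_solution (letters : String) (words : List String) : List String :=
  let lookup : PySem.Dict String (PySem.Set String) :=
    words.foldl (fun d word =>
      let key := pvSortKey word
      let d := if d.contains key then d else d.insert key PySem.Set.empty
      d.modify key PySem.Set.empty (fun s => PySem.Set.add s word)) PySem.Dict.empty
  let search := pvSortKey letters
  lookup.getD search PySem.Set.empty

-- ===== PORT B =====
def find_anagrams_udacity_solution_alt (letters : String) (words : List String) : List String :=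
  let target := pvSortKey letters
  PySem.Set.ofList (words.filter (fun word => pvSortKey word == target))

-- ===== PRECONDITION & SPEC =====
def Spec_find_anagrams_udacity_solution (letters : String) (words : List String) (out : List String) : Prop := out = find_anagrams_udacity_solution_alt letters words
instance (letters : String) (words : List String) (out : List String) : Decidable (Spec_find_anagrams_udacity_solution letters words out) := by unfold Spec_find_anagrams_udacity_solution; infer_instance

-- ===== CLAIM (what is proved, stated in full; the proofs are below) =====
def Claim_equal_find_anagrams_udacity_solution : Prop := ∀ (letters : String) (words : List String), Dom_find_anagrams_udacity_solution letters words → Spec_find_anagrams_udacity_solution letters words (find_anagrams_udacity_solution letters words)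

-- ===== LEMMAS AND PROOFS =====

-- Invariant of A's grouping loop: the entry at key q accumulates (via Set.add) exactly the
-- words whose sort key is q, in order.
theorem pv_foldl_getD (q : String) (words : List String)
    (d : PySem.Dict String (PySem.Set String)) :
    (words.foldl (fun d word =>
        let key := pvSortKey word
        let d := if d.contains key then d else d.insert key PySem.Set.empty
        d.modify key PySem.Set.empty (fun s => PySem.Set.add s word)) d).getD q PySem.Set.empty
      = (words.filter (fun word => pvSortKey word == q)).foldl PySem.Set.add
          (d.getD q PySem.Set.empty) := by
  induction words generalizing d with
  | nil => rfl
  | cons w ws ih =>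
    simp only [List.foldl_cons, List.filter_cons]
    rw [ih]
    by_cases hq : pvSortKey w = q
    · subst hq
      simp only [beq_self_eq_true, if_pos, List.foldl_cons]
      congr 1
      by_cases hc : d.contains (pvSortKey w) = true
      · rw [if_pos hc, PySem.Dict.getD_modify_self]
      · rw [if_neg hc, PySem.Dict.getD_modify_self, PySem.Dict.getD_insert_self,
          PySem.Dict.getD_of_not_contains d _ (by simpa using hc)]
    · have hb : (pvSortKey w == q) = false := by simp [hq]
      simp only [hb, Bool.false_eq_true, if_false]
      congr 1
      by_cases hc : d.contains (pvSortKey w) = true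
      · rw [if_pos hc, PySem.Dict.getD_modify_of_ne d _ _ (Ne.symm hq)]
      · rw [if_neg hc, PySem.Dict.getD_modify_of_ne _ _ _ (Ne.symm hq),
          PySem.Dict.getD_insert_of_ne d _ _ (Ne.symm hq)]

-- ===== VERDICT (by name: the statement is the Claim_ definition above) =====
theorem find_anagrams_udacity_solution_spec : Claim_equal_find_anagrams_udacity_solution := by
  intro letters words _
  show find_anagrams_udacity_solution letters words = find_anagrams_udacity_solution_alt letters words
  unfold find_anagrams_udacity_solution find_anagrams_udacity_solution_alt
  rw [pv_foldl_getD]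
  rw [PySem.Set.ofList_eq_foldl]
  rfl
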